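-- pv_equiv track=rewrite | github.com/dembe412/group10 | core/distributed_state.py | _is_causally_later
-- ===== SOURCE A (Python) =====
-- from typing import Dict, Any, List, Optional, Tuple
--
-- def _is_causally_later(clock_a: Dict[str, int],
--                       clock_b: Dict[str, int]) -> bool:
--     """Check if clock_a happened after clock_b causally."""
--     greater_or_equal = all(
--         clock_a.get(node, 0) >= clock_b.get(node, 0)
--         for node in set(list(clock_a.keys()) + list(clock_b.keys()))
--     )
--
--     strictly_greater = any(
--         clock_a.get(node, 0) > clock_b.get(node, 0)
--         for node in set(list(clock_a.keys()) + list(clock_b.keys()))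
--     )
--
--     return greater_or_equal and strictly_greater
-- ===== SOURCE B (Python) =====
-- def _is_causally_later(clock_a, clock_b):
--     """Check if clock_a happened after clock_b causally."""
--     any_gt = False
--     for node in set(list(clock_a.keys()) + list(clock_b.keys())):
--         a = clock_a.get(node, 0)
--         b = clock_b.get(node, 0)
--         if a < b:
--             return False
--         if a > b:
--             any_gt = True
--     return any_gt
-- ===== Notes on version B (the rewrite author's own statement) =====
-- stated objective: alternative
-- what changed: Replaced A's two independent full passes (all(...) and any(...), each rebuilding the key-union set) with a single fused loop over the union built once, carrying an any_gt flag and returning False early on the first entry where a < b.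
import Mathlib
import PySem

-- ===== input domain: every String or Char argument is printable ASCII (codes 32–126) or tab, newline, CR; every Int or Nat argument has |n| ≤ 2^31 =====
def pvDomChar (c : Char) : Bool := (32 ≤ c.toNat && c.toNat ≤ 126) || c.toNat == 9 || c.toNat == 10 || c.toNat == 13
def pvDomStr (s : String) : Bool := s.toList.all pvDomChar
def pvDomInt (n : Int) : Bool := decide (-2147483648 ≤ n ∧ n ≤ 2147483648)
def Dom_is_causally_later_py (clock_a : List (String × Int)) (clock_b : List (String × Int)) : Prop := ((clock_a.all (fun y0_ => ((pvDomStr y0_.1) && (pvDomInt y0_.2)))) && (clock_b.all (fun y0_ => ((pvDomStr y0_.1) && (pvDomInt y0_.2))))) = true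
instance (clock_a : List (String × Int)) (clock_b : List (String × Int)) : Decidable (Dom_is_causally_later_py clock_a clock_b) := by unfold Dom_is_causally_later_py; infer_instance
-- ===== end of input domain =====

-- B fuses A's two independent passes (all ≥, any >) into one loop over the key union built once,
-- carrying an any_gt flag and exiting early on the first a < b; alternative decomposition, same cost.


-- ===== PORT A =====
def is_causally_later_py (clock_a : List (String × Int)) (clock_b : List (String × Int)) : Bool :=
  let da : PySem.Dict String Int := PySem.Dict.mk clock_a
  let db : PySem.Dict String Int := PySem.Dict.mk clock_b
  -- pass 1: all(clock_a.get(node,0) >= clock_b.get(node,0) for node in set(keys_a + keys_b))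
  let greater_or_equal :=
    (PySem.Set.ofList (da.keys ++ db.keys)).all
      (fun node => da.getD node 0 ≥ db.getD node 0)
  -- pass 2: any(clock_a.get(node,0) > clock_b.get(node,0) for node in set(keys_a + keys_b))
  let strictly_greater :=
    (PySem.Set.ofList (da.keys ++ db.keys)).any
      (fun node => da.getD node 0 > db.getD node 0)
  greater_or_equal && strictly_greater

-- ===== PORT B =====
-- single fused loop with an any_gt accumulator and early exit on a < b
def pvAltLoop (da db : PySem.Dict String Int) : List String → Bool → Bool
  | [], anyGt => anyGt
  | node :: rest, anyGt =>
    let a := da.getD node 0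
    let b := db.getD node 0
    if a < b then false
    else pvAltLoop da db rest (anyGt || decide (a > b))

def is_causally_later_py_alt (clock_a : List (String × Int)) (clock_b : List (String × Int)) : Bool :=
  let da : PySem.Dict String Int := PySem.Dict.mk clock_a
  let db : PySem.Dict String Int := PySem.Dict.mk clock_b
  pvAltLoop da db (PySem.Set.ofList (da.keys ++ db.keys)) false

-- ===== PRECONDITION & SPEC =====
def Spec_is_causally_later_py (clock_a : List (String × Int)) (clock_b : List (String × Int)) (out : Bool) : Prop := out = is_causally_later_py_alt clock_a clock_b
instance (clock_a : List (String × Int)) (clock_b : List (String × Int)) (out : Bool) : Decidable (Spec_is_causally_later_py clock_a clock_b out) := by unfold Spec_is_causally_later_py; infer_instance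

-- ===== CLAIM (what is proved, stated in full; the proofs are below) =====
def Claim_equal_is_causally_later_py : Prop := ∀ (clock_a : List (String × Int)) (clock_b : List (String × Int)), Dom_is_causally_later_py clock_a clock_b → Spec_is_causally_later_py clock_a clock_b (is_causally_later_py clock_a clock_b)

-- ===== LEMMAS AND PROOFS =====
-- the fused loop computes "all ≥ && (acc || any >)" over any node list
theorem pvAltLoop_eq (da db : PySem.Dict String Int) (nodes : List String) (acc : Bool) :
    pvAltLoop da db nodes acc =
      (nodes.all (fun node => da.getD node 0 ≥ db.getD node 0) &&
        (acc || nodes.any (fun node => da.getD node 0 > db.getD node 0))) := by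
  induction nodes generalizing acc with
  | nil => simp [pvAltLoop]
  | cons n rest ih =>
    simp only [pvAltLoop, List.all_cons, List.any_cons]
    by_cases h : da.getD n 0 < db.getD n 0
    · have h' : ¬ da.getD n 0 ≥ db.getD n 0 := by omega
      simp [h, h']
    · rw [if_neg h, ih]
      have hge : da.getD n 0 ≥ db.getD n 0 := by omega
      simp only [hge, decide_true, Bool.true_and]
      cases acc <;> cases hgt : decide (da.getD n 0 > db.getD n 0) <;> simp_all

-- ===== VERDICT (by name: the statement is the Claim_ definition above) =====
theorem is_causally_later_py_spec : Claim_equal_is_causally_later_py := by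
  intro clock_a clock_b _
  unfold Spec_is_causally_later_py is_causally_later_py is_causally_later_py_alt
  rw [pvAltLoop_eq]
  simp
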